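-- pv_equiv track=rewrite | github.com/butteredwaffles/8380-project | suffix_tree.py | compare_orders
-- ===== SOURCE A (Python) =====
-- def compare_orders(t, r12_val, r0_val, inverse_suffix_array) -> bool:
--     # Pairs and triples can be compared to find out which is the next correct value in the sequence
--     t_r12_val = t[r12_val] if r12_val <= len(t) else 0
--     t_r0_val = t[r0_val] if r0_val <= len(t) else 0
--     if t_r12_val < t_r0_val:
--         return True
--     if t_r12_val > t_r0_val:
--         return False
--     if r12_val % 3 != 0 and r0_val % 3 != 0:
--         return inverse_suffix_array[r12_val] < inverse_suffix_array[r0_val]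
--     return compare_orders(t, r12_val + 1, r0_val + 1, inverse_suffix_array)
-- ===== SOURCE B (Python) =====
-- def compare_orders(t, r12_val, r0_val, inverse_suffix_array) -> bool:
--     # The recursion in the original only ever advances while at least one index is a
--     # multiple of 3, so the stopping offset k (at most 2) can be found by residue
--     # arithmetic up front; then compare the at most k+1 symbol pairs and tie-break
--     # with the inverse suffix array.
--     def char(i):
--         return t[i] if i <= len(t) else 0
--
--     k = next(k for k in range(3)
--              if (r12_val + k) % 3 != 0 and (r0_val + k) % 3 != 0)
--     for d in range(k):
--         a, b = char(r12_val + d), char(r0_val + d)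
--         if a != b:
--             return a < b
--     a, b = char(r12_val + k), char(r0_val + k)
--     if a != b:
--         return a < b
--     return inverse_suffix_array[r12_val + k] < inverse_suffix_array[r0_val + k]
-- ===== Notes on version B (the rewrite author's own statement) =====
-- stated objective: alternative
-- what changed: B replaces A's unbounded mutual-increment recursion by computing the stopping offset k (at most 2) from the two indices' residues mod 3 up front, then comparing the at most k+1 symbol pairs in a bounded loop and tie-breaking with the inverse suffix array.
import Mathlib
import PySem

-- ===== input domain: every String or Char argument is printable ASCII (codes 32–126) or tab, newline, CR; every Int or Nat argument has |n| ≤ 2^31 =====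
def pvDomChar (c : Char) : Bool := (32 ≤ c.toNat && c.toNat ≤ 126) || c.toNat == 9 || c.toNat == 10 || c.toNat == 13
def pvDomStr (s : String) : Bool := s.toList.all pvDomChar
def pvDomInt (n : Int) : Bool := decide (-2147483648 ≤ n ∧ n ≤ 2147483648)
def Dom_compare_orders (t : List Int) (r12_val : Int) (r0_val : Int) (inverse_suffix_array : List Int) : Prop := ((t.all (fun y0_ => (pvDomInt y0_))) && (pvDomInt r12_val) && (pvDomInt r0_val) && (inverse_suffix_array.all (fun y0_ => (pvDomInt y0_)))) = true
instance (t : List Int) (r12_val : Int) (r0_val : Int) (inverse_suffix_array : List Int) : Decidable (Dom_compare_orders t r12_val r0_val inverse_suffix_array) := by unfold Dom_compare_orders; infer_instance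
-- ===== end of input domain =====

-- B replaces A's unbounded mutual-increment recursion by computing the stopping
-- offset k ≤ 2 from the residues of the two indices mod 3 up front, then comparing
-- the at most k+1 symbol pairs and tie-breaking with the inverse suffix array
-- (objective: alternative decomposition, same cost).

-- ===== PORT A =====
-- Python: `t[i] if i <= len(t) else 0`; pyGet? models the index access (none = IndexError,
-- totalized by getD 0 — inputs on which A raises are excluded by Pre_ below).
def pvValA (t : List Int) (i : Int) : Int :=
  if i ≤ (t.length : Int) then (PySem.List.pyGet? t i).getD 0 else 0

-- fuel-totalized transliteration of A's recursion; on every input the recursion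
-- returns within at most 3 steps, so the fuel t.length + 4 is never exhausted.
def pvGoA (t : List Int) (isa : List Int) : Int → Int → Nat → Bool
  | _, _, 0 => false
  | r12, r0, n+1 =>
    if pvValA t r12 < pvValA t r0 then true
    else if pvValA t r12 > pvValA t r0 then false
    else if r12 % 3 ≠ 0 ∧ r0 % 3 ≠ 0 then
      decide ((PySem.List.pyGet? isa r12).getD 0 < (PySem.List.pyGet? isa r0).getD 0)
    else pvGoA t isa (r12 + 1) (r0 + 1) n

def compare_orders (t : List Int) (r12_val : Int) (r0_val : Int) (inverse_suffix_array : List Int) : Bool :=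
  pvGoA t inverse_suffix_array r12_val r0_val (t.length + 4)

-- ===== PORT B =====
def pvCharB (t : List Int) (i : Int) : Int :=
  if i ≤ (t.length : Int) then (PySem.List.pyGet? t i).getD 0 else 0

-- `next(k for k in range(3) if (r12+k) % 3 and (r0+k) % 3)`: such a k always exists
-- among {0,1,2}, so the if-chain is an exact transliteration.
def pvKfindB (r12 : Int) (r0 : Int) : Int :=
  if r12 % 3 ≠ 0 ∧ r0 % 3 ≠ 0 then 0
  else if (r12 + 1) % 3 ≠ 0 ∧ (r0 + 1) % 3 ≠ 0 then 1
  else 2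

-- the `for d in range(k)` loop with its early return, as a scan over the range list
def pvScanB (t : List Int) (r12 : Int) (r0 : Int) : List Int → Option Bool
  | [] => none
  | d :: ds =>
    if pvCharB t (r12 + d) ≠ pvCharB t (r0 + d) then
      some (decide (pvCharB t (r12 + d) < pvCharB t (r0 + d)))
    else pvScanB t r12 r0 ds

def compare_orders_alt (t : List Int) (r12_val : Int) (r0_val : Int) (inverse_suffix_array : List Int) : Bool :=
  match pvScanB t r12_val r0_val (PySem.List.pyRange 0 (pvKfindB r12_val r0_val) 1) with
  | some v => v
  | none =>
    if pvCharB t (r12_val + pvKfindB r12_val r0_val) ≠ pvCharB t (r0_val + pvKfindB r12_val r0_val) then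
      decide (pvCharB t (r12_val + pvKfindB r12_val r0_val) < pvCharB t (r0_val + pvKfindB r12_val r0_val))
    else
      decide ((PySem.List.pyGet? inverse_suffix_array (r12_val + pvKfindB r12_val r0_val)).getD 0
              < (PySem.List.pyGet? inverse_suffix_array (r0_val + pvKfindB r12_val r0_val)).getD 0)

-- ===== PRECONDITION & SPEC =====
-- Pre_'s own copies of the small arithmetic helpers (independent of both ports):
abbrev pvKsel (r12 : Int) (r0 : Int) : Int :=
  if r12 % 3 ≠ 0 ∧ r0 % 3 ≠ 0 then 0
  else if (r12 + 1) % 3 ≠ 0 ∧ (r0 + 1) % 3 ≠ 0 then 1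
  else 2
-- index i is a safe operand of Python's `t[i] if i <= len(t) else 0` (no IndexError)
abbrev pvSafe (t : List Int) (i : Int) : Prop :=
  (t.length : Int) < i ∨ (-(t.length : Int) ≤ i ∧ i < (t.length : Int))
abbrev pvIdxOk (xs : List Int) (i : Int) : Prop :=
  -(xs.length : Int) ≤ i ∧ i < (xs.length : Int)
abbrev pvValP (t : List Int) (i : Int) : Int := (PySem.List.pyGet? t i).getD 0

-- Pre_ holds exactly on the inputs where every list access A performs is in range
-- (Python's A raises IndexError on all other inputs; it returns on all of these).
def Pre_compare_orders (t : List Int) (r12_val : Int) (r0_val : Int) (inverse_suffix_array : List Int) : Prop :=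
  (pvSafe t r12_val ∧ pvSafe t r0_val) ∧
  (pvKsel r12_val r0_val < 1 ∨ ¬pvValP t r12_val = pvValP t r0_val ∨
     (pvSafe t (r12_val + 1) ∧ pvSafe t (r0_val + 1))) ∧
  (pvKsel r12_val r0_val < 2 ∨ ¬pvValP t r12_val = pvValP t r0_val ∨
     ¬pvValP t (r12_val + 1) = pvValP t (r0_val + 1) ∨
     (pvSafe t (r12_val + 2) ∧ pvSafe t (r0_val + 2))) ∧
  (¬(pvValP t r12_val = pvValP t r0_val ∧
     (pvKsel r12_val r0_val < 1 ∨ pvValP t (r12_val + 1) = pvValP t (r0_val + 1)) ∧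
     (pvKsel r12_val r0_val < 2 ∨ pvValP t (r12_val + 2) = pvValP t (r0_val + 2))) ∨
   (pvIdxOk inverse_suffix_array (r12_val + pvKsel r12_val r0_val) ∧
    pvIdxOk inverse_suffix_array (r0_val + pvKsel r12_val r0_val)))

instance (t : List Int) (r12_val : Int) (r0_val : Int) (inverse_suffix_array : List Int) : Decidable (Pre_compare_orders t r12_val r0_val inverse_suffix_array) := by
  unfold Pre_compare_orders pvSafe pvIdxOk pvValP pvKsel; infer_instance

def pvWitness_compare_orders : List Int × Int × Int × List Int := ([1, 2, 3], 1, 2, [0, 1, 2])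

def Spec_compare_orders (t : List Int) (r12_val : Int) (r0_val : Int) (inverse_suffix_array : List Int) (out : Bool) : Prop := out = compare_orders_alt t r12_val r0_val inverse_suffix_array
instance (t : List Int) (r12_val : Int) (r0_val : Int) (inverse_suffix_array : List Int) (out : Bool) : Decidable (Spec_compare_orders t r12_val r0_val inverse_suffix_array out) := by unfold Spec_compare_orders; infer_instance

-- ===== CLAIM (what is proved, stated in full; the proofs are below) =====
def Claim_equal_compare_orders : Prop := ∀ (t : List Int) (r12_val : Int) (r0_val : Int) (inverse_suffix_array : List Int), Dom_compare_orders t r12_val r0_val inverse_suffix_array → Pre_compare_orders t r12_val r0_val inverse_suffix_array → Spec_compare_orders t r12_val r0_val inverse_suffix_array (compare_orders t r12_val r0_val inverse_suffix_array)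

-- ===== LEMMAS AND PROOFS =====

lemma pvCharB_eq_pvValA : pvCharB = pvValA := rfl

lemma pvGoA_step (t isa : List Int) (i j : Int) (n : Nat) :
    pvGoA t isa i j (n + 1) =
      (if pvValA t i < pvValA t j then true
       else if pvValA t i > pvValA t j then false
       else if i % 3 ≠ 0 ∧ j % 3 ≠ 0 then
         decide ((PySem.List.pyGet? isa i).getD 0 < (PySem.List.pyGet? isa j).getD 0)
       else pvGoA t isa (i + 1) (j + 1) n) := rfl

-- step with differing values: A returns the comparison at once
lemma pvGoA_step_diff (t isa : List Int) (i j : Int) (n : Nat)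
    (h : pvValA t i ≠ pvValA t j) :
    pvGoA t isa i j (n + 1) = decide (pvValA t i < pvValA t j) := by
  rw [pvGoA_step]
  rcases lt_trichotomy (pvValA t i) (pvValA t j) with hlt | heq | hgt
  · rw [if_pos hlt]; exact (decide_eq_true hlt).symm
  · exact absurd heq h
  · rw [if_neg (lt_asymm hgt), if_pos hgt]
    exact (decide_eq_false (lt_asymm hgt)).symm

-- tie step with at least one index a multiple of 3: A recurses
lemma pvGoA_step_rec (t isa : List Int) (i j : Int) (n : Nat)
    (h : ¬(i % 3 ≠ 0 ∧ j % 3 ≠ 0)) (htie : pvValA t i = pvValA t j) :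
    pvGoA t isa i j (n + 1) = pvGoA t isa (i + 1) (j + 1) n := by
  rw [pvGoA_step, htie, if_neg (lt_irrefl _), if_neg (lt_irrefl _), if_neg h]

-- "final" step: both residues nonzero, compare values then tie-break via isa
lemma pvGoA_step_final (t isa : List Int) (i j : Int) (n : Nat)
    (hi : i % 3 ≠ 0) (hj : j % 3 ≠ 0) :
    pvGoA t isa i j (n + 1) =
      (if pvValA t i ≠ pvValA t j then decide (pvValA t i < pvValA t j)
       else decide ((PySem.List.pyGet? isa i).getD 0 < (PySem.List.pyGet? isa j).getD 0)) := by
  by_cases h : pvValA t i = pvValA t j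
  · rw [pvGoA_step, h, if_neg (lt_irrefl _), if_neg (lt_irrefl _), if_pos ⟨hi, hj⟩,
      if_neg (fun hn => hn rfl)]
  · rw [pvGoA_step_diff t isa i j n h, if_pos h]

theorem pv_ports_eq (t : List Int) (r12 : Int) (r0 : Int) (isa : List Int) :
    compare_orders t r12 r0 isa = compare_orders_alt t r12 r0 isa := by
  have hfuel : t.length + 4 = (t.length + 3) + 1 := rfl
  have h3 : t.length + 3 = (t.length + 2) + 1 := rfl
  have h4 : t.length + 2 = (t.length + 1) + 1 := rfl
  unfold compare_orders compare_orders_alt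
  by_cases h0 : r12 % 3 ≠ 0 ∧ r0 % 3 ≠ 0
  · -- k = 0
    have hk : pvKfindB r12 r0 = 0 := by unfold pvKfindB; rw [if_pos h0]
    rw [hk, show PySem.List.pyRange 0 0 1 = ([] : List Int) from by decide,
      hfuel, pvGoA_step_final t isa r12 r0 _ h0.1 h0.2]
    simp only [pvScanB, pvCharB_eq_pvValA, add_zero]
  · -- ¬(first pair usable)
    have hk1 : ¬(r12 % 3 ≠ 0 ∧ r0 % 3 ≠ 0) := h0
    by_cases h1 : (r12 + 1) % 3 ≠ 0 ∧ (r0 + 1) % 3 ≠ 0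
    · -- k = 1
      have hk : pvKfindB r12 r0 = 1 := by unfold pvKfindB; rw [if_neg h0, if_pos h1]
      rw [hk, show PySem.List.pyRange 0 1 1 = ([0] : List Int) from by decide, hfuel]
      simp only [pvScanB, pvCharB_eq_pvValA, add_zero]
      by_cases hd0 : pvValA t r12 = pvValA t r0
      · rw [if_neg (fun hn => hn hd0), pvGoA_step_rec t isa r12 r0 _ h0 hd0, h3,
          pvGoA_step_final t isa (r12 + 1) (r0 + 1) _ h1.1 h1.2]
        rfl
      · rw [if_pos hd0, pvGoA_step_diff t isa r12 r0 _ hd0]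
    · -- k = 2; the residues force both offsets-by-2 to be nonmultiples of 3
      have h2a : (r12 + 2) % 3 ≠ 0 := by omega
      have h2b : (r0 + 2) % 3 ≠ 0 := by omega
      have hk : pvKfindB r12 r0 = 2 := by unfold pvKfindB; rw [if_neg h0, if_neg h1]
      rw [hk, show PySem.List.pyRange 0 2 1 = ([0, 1] : List Int) from by decide, hfuel]
      simp only [pvScanB, pvCharB_eq_pvValA, add_zero]
      by_cases hd0 : pvValA t r12 = pvValA t r0
      · rw [if_neg (fun hn => hn hd0), pvGoA_step_rec t isa r12 r0 _ h0 hd0, h3]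
        by_cases hd1 : pvValA t (r12 + 1) = pvValA t (r0 + 1)
        · rw [if_neg (fun hn => hn hd1), pvGoA_step_rec t isa (r12 + 1) (r0 + 1) _ h1 hd1, h4,
            pvGoA_step_final t isa (r12 + 1 + 1) (r0 + 1 + 1) _ (by omega) (by omega),
            show r12 + 1 + 1 = r12 + 2 from by ring, show r0 + 1 + 1 = r0 + 2 from by ring]
          rfl
        · rw [if_pos hd1, pvGoA_step_diff t isa (r12 + 1) (r0 + 1) _ hd1]
          rfl
      · rw [if_pos hd0, pvGoA_step_diff t isa r12 r0 _ hd0]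

-- ===== VERDICT (by name: the statement is the Claim_ definition above) =====
theorem compare_orders_spec : Claim_equal_compare_orders := by
  intro t r12 r0 isa _ _
  unfold Spec_compare_orders
  exact pv_ports_eq t r12 r0 isa
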